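-- pv_equiv track=rewrite | github.com/Samleyz/Leetcode-Problems | 3024.type-of-triangle.py | triangleType
-- ===== SOURCE A (Python) =====
-- def triangleType(nums):
--     a = (nums[0]+nums[1])
--     b= (nums[1] +nums[2])
--     c = (nums[0] + nums[2])
--     if a <= nums[2] or b <= nums[0] or c <= nums[1]:
--         return 'none'
--
--     seen = set()
--     for i in nums:
--         if i not in seen:
--             seen.add(i)
--
--     if len(seen) == 3:
--         return 'scalene'
--     elif len(seen) == 2:
--         return 'isosceles'
--     else:
--         return 'equilateral'
-- ===== SOURCE B (Python) =====
-- def triangleType(nums):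
--     lo, mid, hi = sorted(nums[:3])
--     if lo + mid <= hi:
--         return 'none'
--     s = sorted(nums)
--     k = 1 + sum(1 for a, b in zip(s, s[1:]) if a != b)
--     return 'scalene' if k == 3 else 'isosceles' if k == 2 else 'equilateral'
-- ===== Notes on version B (the rewrite author's own statement) =====
-- stated objective: alternative
-- what changed: B sorts instead of scanning: validity becomes the single comparison lo+mid<=hi on the sorted first three sides (replacing A's three inequality checks), and the number of distinct side lengths is counted as adjacent differences in the sorted list instead of building a set element by element.
import Mathlib
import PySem

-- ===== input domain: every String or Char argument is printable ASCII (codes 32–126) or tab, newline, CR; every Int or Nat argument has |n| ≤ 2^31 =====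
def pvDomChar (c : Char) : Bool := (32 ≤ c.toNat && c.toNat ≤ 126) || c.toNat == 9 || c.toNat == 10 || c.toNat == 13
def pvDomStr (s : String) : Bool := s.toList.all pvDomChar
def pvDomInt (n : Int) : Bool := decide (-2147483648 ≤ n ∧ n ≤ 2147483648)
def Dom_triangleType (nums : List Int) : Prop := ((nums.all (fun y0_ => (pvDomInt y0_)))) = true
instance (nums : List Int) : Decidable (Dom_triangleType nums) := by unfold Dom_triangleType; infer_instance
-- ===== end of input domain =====

-- B sorts instead of scanning: one comparison on the sorted first three sides replaces A's three
-- inequality checks, and adjacent differences in the sorted list replace A's set-building pass.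
-- Neither version mutates nums (B uses sorted, not sort).

-- ===== PORT A =====
def triangleType (nums : List Int) : String :=
  match (PySem.List.pyGet? nums 0, PySem.List.pyGet? nums 1, PySem.List.pyGet? nums 2) with
  | (some n0, some n1, some n2) =>
    let a := n0 + n1
    let b := n1 + n2
    let c := n0 + n2
    if a ≤ n2 ∨ b ≤ n0 ∨ c ≤ n1 then "none"
    else
      let seen := nums.foldl
        (fun s i => if ¬ PySem.Set.contains s i then PySem.Set.add s i else s)
        PySem.Set.empty
      if PySem.Set.len seen = 3 then "scalene"
      else if PySem.Set.len seen = 2 then "isosceles"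
      else "equilateral"
  | _ => ""  -- IndexError: excluded by Pre_

-- ===== PORT B =====
def triangleType_alt (nums : List Int) : String :=
  match PySem.List.sorted (PySem.List.slice nums none (some 3)) (fun v => v) false with
  | [lo, mid, hi] =>
    if lo + mid ≤ hi then "none"
    else
      -- s = sorted(nums); k = 1 + number of adjacent unequal pairs (s inlined at its two uses)
      if (1 + ((PySem.List.sorted nums (fun v => v) false).zip
            (PySem.List.slice (PySem.List.sorted nums (fun v => v) false) (some 1) none)).foldl
            (fun acc p => if p.1 ≠ p.2 then acc + 1 else acc) 0 : Int) = 3 then "scalene"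
      else if (1 + ((PySem.List.sorted nums (fun v => v) false).zip
            (PySem.List.slice (PySem.List.sorted nums (fun v => v) false) (some 1) none)).foldl
            (fun acc p => if p.1 ≠ p.2 then acc + 1 else acc) 0 : Int) = 2 then "isosceles"
      else "equilateral"
  | _ => ""  -- unpacking sorted(nums[:3]) into lo, mid, hi raises unless it has 3 elements: excluded by Pre_

-- ===== PRECONDITION & SPEC =====
-- Pre_ excludes only the lists of fewer than three elements, on which A raises IndexError
-- (and B's three-name unpacking raises ValueError).
def Pre_triangleType (nums : List Int) : Prop := 3 ≤ nums.length
instance (nums : List Int) : Decidable (Pre_triangleType nums) := by unfold Pre_triangleType; infer_instance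
def pvWitness_triangleType : List Int := [3, 4, 5]
def Spec_triangleType (nums : List Int) (out : String) : Prop := out = triangleType_alt nums
instance (nums : List Int) (out : String) : Decidable (Spec_triangleType nums out) := by unfold Spec_triangleType; infer_instance

-- ===== CLAIM (what is proved, stated in full; the proofs are below) =====
def Claim_equal_triangleType : Prop := ∀ (nums : List Int), Dom_triangleType nums → Pre_triangleType nums → Spec_triangleType nums (triangleType nums)

-- ===== LEMMAS AND PROOFS =====

-- A's membership-guarded insertion loop is Set.add's own check: the fold builds set(nums).
lemma seen_eq_ofList (l : List Int) (s : PySem.Set Int) :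
    l.foldl (fun s i => if ¬ PySem.Set.contains s i then PySem.Set.add s i else s) s
      = l.foldl PySem.Set.add s := by
  have hf : (fun (s : PySem.Set Int) i => if ¬ PySem.Set.contains s i then PySem.Set.add s i else s)
      = PySem.Set.add := by
    funext s i
    by_cases h : PySem.Set.contains s i = true
    all_goals simp only [PySem.Set.contains, List.contains_eq_mem, decide_eq_true_eq] at h
    · simp [PySem.Set.add, h]
    · simp [PySem.Set.add, h]
  rw [hf]

-- On a ≤-sorted nonempty list, 1 + (number of adjacent unequal pairs) = number of distinct values.
lemma adj_count_sorted (s : List Int) (hp : s.Pairwise (· ≤ ·)) (hne : s ≠ []) :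
    s.toFinset.card = 1 + (s.zip s.tail).countP (fun p => decide (p.1 ≠ p.2)) := by
  induction s with
  | nil => exact absurd rfl hne
  | cons a t ih =>
    match t with
    | [] => simp
    | b :: t' =>
      have hp' : (b :: t').Pairwise (· ≤ ·) := hp.of_cons
      have ihbt := ih hp' (by simp)
      by_cases hab : a = b
      · subst hab
        simp only [List.toFinset_cons, List.zip, List.tail] at *
        simp [ihbt]
      · have halt : a ∉ (b :: t').toFinset := by
          simp only [List.mem_toFinset, List.mem_cons]
          rintro (h | h)
          · exact hab h
          · have h1 : a ≤ b := (List.pairwise_cons.mp hp).1 b (by simp)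
            have h2 : b ≤ a := (List.pairwise_cons.mp hp').1 a h
            exact hab (le_antisymm h1 h2)
        simp only [List.toFinset_cons] at *
        rw [Finset.card_insert_of_notMem halt]
        simp only [List.zip, List.tail] at *
        simp [ihbt, hab]
        omega

-- distinct count of nums = distinct count of sorted nums, via Nodup/Perm.
lemma ofList_len_eq (l : List Int) :
    (PySem.Set.ofList l).length = l.toFinset.card := by
  have h1 : (PySem.Set.ofList l).toFinset = l.toFinset := by
    ext x; simp [PySem.Set.mem_ofList]
  have h2 : (PySem.Set.ofList l : List Int).Nodup := PySem.Set.nodup_ofList l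
  rw [← h1, List.toFinset_card_of_nodup h2]

-- ===== VERDICT (by name: the statement is the Claim_ definition above) =====
set_option maxHeartbeats 2000000 in
theorem triangleType_spec : Claim_equal_triangleType := by
  intro nums _ hpre
  unfold Pre_triangleType at hpre
  match nums, hpre with
  | x :: y :: z :: rest, _ =>
    unfold Spec_triangleType triangleType triangleType_alt
    have hg0 : PySem.List.pyGet? (x::y::z::rest) 0 = some x :=
      PySem.List.pyGet?_zero_cons x (y::z::rest)
    have hg1 : PySem.List.pyGet? (x::y::z::rest) 1 = some y := by
      have := PySem.List.pyGet?_ofNat (x::y::z::rest) 1 (by simp)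
      norm_num at this; simpa using this
    have hg2 : PySem.List.pyGet? (x::y::z::rest) 2 = some z := by
      have := PySem.List.pyGet?_ofNat (x::y::z::rest) 2 (by simp)
      norm_num at this; simpa using this
    have hsl : PySem.List.slice (x::y::z::rest) none (some 3) = [x,y,z] := by
      have := PySem.List.slice_to (b := 3) (x::y::z::rest) (by norm_num)
      norm_num at this; simpa using this
    rw [hg0, hg1, hg2, hsl]
    -- the classification count on A's side: len(seen) = number of distinct sides
    have hseen : PySem.Set.len ((x::y::z::rest).foldl
        (fun s i => if ¬ PySem.Set.contains s i then PySem.Set.add s i else s) PySem.Set.empty)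
        = ((x::y::z::rest).toFinset.card : Int) := by
      rw [seen_eq_ofList]
      have hof : (x::y::z::rest).foldl PySem.Set.add PySem.Set.empty
          = PySem.Set.ofList (x::y::z::rest) := (PySem.Set.ofList_eq_foldl _).symm
      rw [hof]
      simp [PySem.Set.len, ofList_len_eq]
    -- the classification count on B's side: 1 + adjacent differences in sorted nums
    have hk : (1 : Int) + ((PySem.List.sorted (x::y::z::rest) (fun v => v) false).zip
        (PySem.List.slice (PySem.List.sorted (x::y::z::rest) (fun v => v) false) (some 1) none)).foldl
        (fun acc p => if p.1 ≠ p.2 then acc + 1 else acc) 0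
        = ((x::y::z::rest).toFinset.card : Int) := by
      rw [PySem.List.slice_from_one, PySem.List.foldl_ite_add_one (fun q : Int × Int => q.1 ≠ q.2)]
      have hp : (PySem.List.sorted (x::y::z::rest) (fun v => v) false).Pairwise (· ≤ ·) := by
        simpa using PySem.List.sorted_pairwise (x::y::z::rest) (fun v => v)
      have hperm := PySem.List.sorted_perm (x::y::z::rest) (fun v => v) false
      have hfin := List.toFinset_eq_of_perm _ _ hperm
      have hne : PySem.List.sorted (x::y::z::rest) (fun v => v) false ≠ [] := by
        rw [Ne, PySem.List.sorted_eq_nil_iff]; simp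
      have hadj := adj_count_sorted _ hp hne
      rw [hfin] at hadj
      rw [hadj]
      push_cast
      ring
    simp only [hseen, hk]
    rw [PySem.List.sorted_eq_foldl_insertBy]
    simp only [List.foldl, PySem.List.insertBy]
    split_ifs <;> (try simp_all [PySem.List.insertBy]) <;> (try split_ifs) <;>
      (try simp_all) <;> omega
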